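-- pv_equiv track=rewrite | github.com/ixi6/MassGen | scripts/dump_timeline_from_events.py | parse_mode_flags
-- ===== SOURCE A (Python) =====
-- def parse_mode_flags(args: list[str]) -> tuple[str, list[str]]:
--     """Parse replay mode flags and return `(mode, remaining_args)`."""
--     flag_to_mode = {
--         "--tui": "tui",
--         "--tui-real": "tui_real",
--     }
--     selected_flags = [flag for flag in flag_to_mode if flag in args]
--     if len(selected_flags) > 1:
--         raise ValueError("Use either --tui or --tui-real, not both.")
--
--     mode = flag_to_mode[selected_flags[0]] if selected_flags else "text"
--     filtered_args = [arg for arg in args if arg not in flag_to_mode]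
--     return mode, filtered_args
-- ===== SOURCE B (Python) =====
-- def parse_mode_flags(args: list[str]) -> tuple[str, list[str]]:
--     """Parse replay mode flags and return `(mode, remaining_args)` in one pass."""
--     _flag_to_mode = {
--         "--tui": "tui",
--         "--tui-real": "tui_real",
--     }
--     mode = None
--     filtered_args = []
--     for arg in args:
--         m = _flag_to_mode.get(arg)
--         if m is None:
--             filtered_args.append(arg)
--         elif mode is not None and mode != m:
--             raise ValueError("Use either --tui or --tui-real, not both.")
--         else:
--             mode = m
--     return (mode if mode is not None else "text"), filtered_args
-- ===== Notes on version B (the rewrite author's own statement) =====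
-- stated objective: simpler
-- what changed: A builds a selected-flags list and a filtered list in two separate comprehensions over args (plus a dict lookup of the first selected flag); B is a single pass over args that accumulates filtered_args and the current mode, raising as soon as a second, different flag is seen.
-- outside the precondition, e.g. on parse_mode_flags(['--tui', '--tui-real']): A raises ValueError, B raises ValueError
import Mathlib
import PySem

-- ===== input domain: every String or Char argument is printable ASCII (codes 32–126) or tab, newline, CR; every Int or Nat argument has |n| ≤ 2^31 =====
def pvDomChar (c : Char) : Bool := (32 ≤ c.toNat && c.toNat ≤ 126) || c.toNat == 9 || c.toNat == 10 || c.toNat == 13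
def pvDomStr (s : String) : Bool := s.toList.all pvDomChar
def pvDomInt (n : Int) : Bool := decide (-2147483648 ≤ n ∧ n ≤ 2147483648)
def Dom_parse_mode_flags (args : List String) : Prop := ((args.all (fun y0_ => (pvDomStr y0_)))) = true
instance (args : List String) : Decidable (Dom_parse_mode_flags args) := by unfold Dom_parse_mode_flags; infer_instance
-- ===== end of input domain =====

-- B is a single pass accumulating the filtered args and the current mode (objective: simpler);
-- on the excluded both-flags inputs both Pythons raise ValueError.

-- ===== PORT A =====
-- flag_to_mode dict: keys in insertion order, lookup by first match.
def pvFlagKeys : List String := ["--tui", "--tui-real"]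

def pvFlagToMode (f : String) : String :=
  if f = "--tui" then "tui" else "tui_real"

def parse_mode_flags (args : List String) : String × List String :=
  -- selected_flags = [flag for flag in flag_to_mode if flag in args]
  let selected_flags := pvFlagKeys.filter (fun f => args.contains f)
  -- if len(selected_flags) > 1: raise ValueError(...)  — excluded by Pre_
  if selected_flags.length > 1 then ("", [])
  else
    let mode := match selected_flags with
      | [] => "text"
      | f :: _ => pvFlagToMode f
    let filtered_args := args.filter (fun a => ¬ pvFlagKeys.contains a)
    (mode, filtered_args)

-- ===== PORT B =====
-- the loop of Source B: state = (current mode, filtered args so far); none = the raise (excluded by Pre_)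
def pvGoB : List String → Option String → List String → Option (Option String × List String)
  | [], mode, filtered => some (mode, filtered)
  | a :: rest, mode, filtered =>
    if a = "--tui" ∨ a = "--tui-real" then
      let m := pvFlagToMode a
      match mode with
      | some m' => if m' ≠ m then none else pvGoB rest (some m) filtered
      | none => pvGoB rest (some m) filtered
    else pvGoB rest mode (filtered ++ [a])

def parse_mode_flags_alt (args : List String) : String × List String :=
  match pvGoB args none [] with
  | none => ("", [])  -- the raise path; excluded by Pre_
  | some (mode, filtered) => ((mode.getD "text"), filtered)

-- ===== PRECONDITION & SPEC =====
-- Pre_ excludes exactly the inputs containing both "--tui" and "--tui-real", on which both A and B raise ValueError.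
def Pre_parse_mode_flags (args : List String) : Prop :=
  ¬ ("--tui" ∈ args ∧ "--tui-real" ∈ args)
instance (args : List String) : Decidable (Pre_parse_mode_flags args) := by
  unfold Pre_parse_mode_flags; infer_instance

def pvWitness_parse_mode_flags : List String := ["--tui", "x"]

def Spec_parse_mode_flags (args : List String) (out : String × List String) : Prop := out = parse_mode_flags_alt args
instance (args : List String) (out : String × List String) : Decidable (Spec_parse_mode_flags args out) := by unfold Spec_parse_mode_flags; infer_instance

-- ===== CLAIM (what is proved, stated in full; the proofs are below) =====
def Claim_equal_parse_mode_flags : Prop := ∀ (args : List String), Dom_parse_mode_flags args → Pre_parse_mode_flags args → Spec_parse_mode_flags args (parse_mode_flags args)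

-- ===== LEMMAS AND PROOFS =====

-- final mode of B's loop given the start mode and the remaining list
def pvNewMode (mode : Option String) (l : List String) : Option String :=
  match mode with
  | some m => some m
  | none =>
    if "--tui" ∈ l then some "tui"
    else if "--tui-real" ∈ l then some "tui_real"
    else none

-- compatibility of the start mode with the remaining list (no conflicting flag ahead)
def pvCompat (mode : Option String) (l : List String) : Prop :=
  match mode with
  | some m => (m = "tui" ∧ "--tui-real" ∉ l) ∨ (m = "tui_real" ∧ "--tui" ∉ l)
  | none => ¬ ("--tui" ∈ l ∧ "--tui-real" ∈ l)

theorem pvGoB_spec (l : List String) : ∀ (mode : Option String) (filtered : List String),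
    pvCompat mode l →
    pvGoB l mode filtered =
      some (pvNewMode mode l, filtered ++ l.filter (fun a => ¬ pvFlagKeys.contains a)) := by
  induction l with
  | nil => intro mode filtered _; simp [pvGoB, pvNewMode]; cases mode <;> simp
  | cons a rest ih =>
    intro mode filtered hc
    by_cases h1 : a = "--tui"
    · subst h1
      cases mode with
      | none =>
        have hnr : "--tui-real" ∉ rest := fun h =>
          hc ⟨List.mem_cons_self, List.mem_cons_of_mem _ h⟩
        rw [show pvGoB ("--tui" :: rest) none filtered = pvGoB rest (some "tui") filtered from rfl,
          ih (some "tui") filtered (Or.inl ⟨rfl, hnr⟩)]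
        simp [pvNewMode, pvFlagKeys]
      | some m =>
        rcases hc with ⟨hm, hnr⟩ | ⟨hm, hnt⟩
        · subst hm
          have hnr' : "--tui-real" ∉ rest := fun h => hnr (List.mem_cons_of_mem _ h)
          rw [show pvGoB ("--tui" :: rest) (some "tui") filtered
                = pvGoB rest (some "tui") filtered from rfl,
            ih (some "tui") filtered (Or.inl ⟨rfl, hnr'⟩)]
          simp [pvNewMode, pvFlagKeys]
        · exact absurd List.mem_cons_self (by subst hm; exact hnt)
    · by_cases h2 : a = "--tui-real"
      · subst h2
        cases mode with
        | none =>
          have hnt : "--tui" ∉ rest := fun h =>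
            hc ⟨List.mem_cons_of_mem _ h, List.mem_cons_self⟩
          rw [show pvGoB ("--tui-real" :: rest) none filtered
                = pvGoB rest (some "tui_real") filtered from rfl,
            ih (some "tui_real") filtered (Or.inr ⟨rfl, hnt⟩)]
          simp [pvNewMode, pvFlagKeys, hnt]
        | some m =>
          rcases hc with ⟨hm, hnr⟩ | ⟨hm, hnt⟩
          · exact absurd List.mem_cons_self (by subst hm; exact hnr)
          · subst hm
            have hnt' : "--tui" ∉ rest := fun h => hnt (List.mem_cons_of_mem _ h)
            rw [show pvGoB ("--tui-real" :: rest) (some "tui_real") filtered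
                  = pvGoB rest (some "tui_real") filtered from rfl,
              ih (some "tui_real") filtered (Or.inr ⟨rfl, hnt'⟩)]
            simp [pvNewMode, pvFlagKeys]
      · have h1' : "--tui" ≠ a := fun h => h1 h.symm
        have h2' : "--tui-real" ≠ a := fun h => h2 h.symm
        have hmem : a ∉ pvFlagKeys := by simp [pvFlagKeys, h1, h2]
        have hcr : pvCompat mode rest := by
          cases mode with
          | none =>
            intro ⟨ht, hr⟩
            exact hc ⟨List.mem_cons_of_mem _ ht, List.mem_cons_of_mem _ hr⟩
          | some m =>
            rcases hc with ⟨hm, hnr⟩ | ⟨hm, hnt⟩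
            · exact Or.inl ⟨hm, fun h => hnr (List.mem_cons_of_mem _ h)⟩
            · exact Or.inr ⟨hm, fun h => hnt (List.mem_cons_of_mem _ h)⟩
        simp only [pvGoB, h1, h2, false_or, if_false]
        rw [ih mode (filtered ++ [a]) hcr]
        cases mode <;> simp [pvNewMode, h1', h2', hmem, List.filter]

-- ===== VERDICT (by name: the statement is the Claim_ definition above) =====
theorem parse_mode_flags_spec : Claim_equal_parse_mode_flags := by
  intro args _ hpre
  unfold Spec_parse_mode_flags parse_mode_flags parse_mode_flags_alt
  rw [pvGoB_spec args none [] hpre]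
  by_cases ht : "--tui" ∈ args
  · have hr : "--tui-real" ∉ args := fun h => hpre ⟨ht, h⟩
    simp [pvNewMode, pvFlagKeys, pvFlagToMode, ht, hr]
  · by_cases hr : "--tui-real" ∈ args
    · simp [pvNewMode, pvFlagKeys, pvFlagToMode, ht, hr]
    · simp [pvNewMode, pvFlagKeys, ht, hr]
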